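-- pv_equiv track=rewrite | github.com/AntonioDEM/MICRO_HELP | abt/text_formatter.py | process_multiline_text
-- ===== SOURCE A (Python) =====
-- def process_multiline_text(text: str) -> str:
--     """
--     Gestisce il testo multilinea preservando formattazione e raw blocks.
--     Supporta:
--     - A capo espliciti con \
--     - A capo impliciti con linee vuote
--     - Raw blocks
--     - Escapeing di caratteri speciali
--     """
--     if not text:
--         return ""
--
--     lines = text.split('\n')
--     processed_lines = []
--     current_paragraph = []
--     in_raw_block = False
--     raw_content = []
--
--     for line in lines:
--         line = line.rstrip()
--
--         # Gestione raw blocks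
--         if '\\raw{' in line:
--             if current_paragraph:
--                 processed_lines.append(' '.join(current_paragraph))
--                 current_paragraph = []
--             in_raw_block = True
--             raw_content.append(line)
--             continue
--
--         if in_raw_block:
--             raw_content.append(line)
--             if '}' in line:
--                 in_raw_block = False
--                 processed_lines.append('\n'.join(raw_content))
--                 raw_content = []
--             continue
--
--         # Gestione normale
--         if not line:
--             if current_paragraph:
--                 processed_lines.append(' '.join(current_paragraph))
--                 current_paragraph = []
--             processed_lines.append('')
--             continue
--
--         if line.endswith('\\'):
--             if current_paragraph:
--                 processed_lines.append(' '.join(current_paragraph))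
--                 current_paragraph = []
--             processed_lines.append(line[:-1].rstrip())
--             continue
--
--         current_paragraph.append(line.strip())
--
--     # Processa l'ultimo paragrafo o raw block
--     if in_raw_block and raw_content:
--         processed_lines.append('\n'.join(raw_content))
--     elif current_paragraph:
--         processed_lines.append(' '.join(current_paragraph))
--
--     return '\n\n'.join(line for line in processed_lines if line is not None)
-- ===== SOURCE B (Python) =====
-- def process_multiline_text(text: str) -> str:
--     if not text:
--         return ""
--
--     lines = [l.rstrip() for l in text.split('\n')]
--     n = len(lines)
--     out = []
--     paragraph = []
--
--     def flush():
--         if paragraph: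
--             out.append(' '.join(paragraph))
--             paragraph.clear()
--
--     i = 0
--     while i < n:
--         line = lines[i]
--         if '\\raw{' in line:
--             # raw block: gather lines until one (not itself opening a raw
--             # block) contains '}', or the input ends
--             flush()
--             raw = [line]
--             i += 1
--             while i < n:
--                 raw.append(lines[i])
--                 if '\\raw{' not in lines[i] and '}' in lines[i]:
--                     i += 1
--                     break
--                 i += 1
--             out.append('\n'.join(raw))
--             continue
--         if not line:
--             flush()
--             out.append('')
--         elif line.endswith('\\'):
--             flush()
--             out.append(line[:-1].rstrip())
--         else:
--             paragraph.append(line.strip())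
--         i += 1
--
--     flush()
--     return '\n\n'.join(out)
-- ===== Notes on version B (the rewrite author's own statement) =====
-- stated objective: alternative
-- what changed: Replaced A's single per-line loop carrying in_raw_block/raw_content state flags by an index-based scan whose inner loop consumes an entire raw block at once, leaving only the pending-paragraph accumulator in the outer loop.
import Mathlib
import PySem

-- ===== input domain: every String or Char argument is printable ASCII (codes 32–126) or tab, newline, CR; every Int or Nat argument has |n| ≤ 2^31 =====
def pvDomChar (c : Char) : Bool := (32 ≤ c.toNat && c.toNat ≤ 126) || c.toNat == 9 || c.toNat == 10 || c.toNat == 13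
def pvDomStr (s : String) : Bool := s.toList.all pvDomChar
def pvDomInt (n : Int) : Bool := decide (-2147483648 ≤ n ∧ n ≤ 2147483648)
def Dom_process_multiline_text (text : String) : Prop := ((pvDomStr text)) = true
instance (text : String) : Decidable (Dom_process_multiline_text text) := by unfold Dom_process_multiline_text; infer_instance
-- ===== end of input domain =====

-- B replaces A's per-line state flags (in_raw_block / raw_content carried through one big loop)
-- by an index-based scan with an inner loop that consumes a whole raw block at once (objective: alternative).

-- ===== PORT A =====
-- one iteration of A's for-loop; state = (processed_lines, current_paragraph, in_raw_block, raw_content)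
def pvStepA (st : List String × List String × Bool × List String) (line0 : String) :
    List String × List String × Bool × List String :=
  match st with
  | (pl, cp, inRaw, raw) =>
    let line := PySem.Str.rstrip line0
    if PySem.Str.isIn "\\raw{" line then
      let pl := if cp ≠ [] then pl ++ [PySem.Str.join " " cp] else pl
      (pl, [], true, raw ++ [line])
    else if inRaw then
      if PySem.Str.isIn "}" line then
        (pl ++ [PySem.Str.join "\n" (raw ++ [line])], cp, false, [])
      else (pl, cp, true, raw ++ [line])
    else if line = "" then
      let pl := if cp ≠ [] then pl ++ [PySem.Str.join " " cp] else pl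
      (pl ++ [""], [], inRaw, raw)
    else if PySem.Str.endswith line "\\" then
      let pl := if cp ≠ [] then pl ++ [PySem.Str.join " " cp] else pl
      (pl ++ [PySem.Str.rstrip (PySem.Str.slice line none (some (-1)))], [], inRaw, raw)
    else (pl, cp ++ [PySem.Str.strip line], inRaw, raw)

def process_multiline_text (text : String) : String :=
  if text = "" then ""
  else
    let lines := (PySem.Str.split? text "\n").getD []   -- split? is some: sep "\n" ≠ ""
    match lines.foldl pvStepA ([], [], false, []) with
    | (pl, cp, inRaw, raw) =>
      let pl :=
        if inRaw ∧ raw ≠ [] then pl ++ [PySem.Str.join "\n" raw]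
        else if cp ≠ [] then pl ++ [PySem.Str.join " " cp]
        else pl
      -- the Python's 'if line is not None' filter keeps every element: identity
      PySem.Str.join "\n\n" pl

-- ===== PORT B =====
-- B's inner while loop: consume (already rstripped) lines into the raw buffer until a line
-- that does not itself contain '\raw{' contains '}'; returns (raw buffer, remaining lines)
def pvCollectRaw : List String → List String → List String × List String
  | [], acc => (acc, [])
  | l :: rest, acc =>
    if PySem.Str.isIn "\\raw{" l then pvCollectRaw rest (acc ++ [l])
    else if PySem.Str.isIn "}" l then (acc ++ [l], rest)
    else pvCollectRaw rest (acc ++ [l])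

theorem pvCollectRaw_rest_le : ∀ (ls acc : List String), (pvCollectRaw ls acc).2.length ≤ ls.length := by
  intro ls
  induction ls with
  | nil => intro acc; simp [pvCollectRaw]
  | cons l rest ih =>
    intro acc
    simp only [pvCollectRaw]
    split_ifs with h1 h2
    · exact le_trans (ih _) (by simp)
    · simp
    · exact le_trans (ih _) (by simp)

-- B's outer while loop over the rstripped lines, carrying only the pending paragraph
def pvGoB : List String → List String → List String
  | [], par => if par ≠ [] then [PySem.Str.join " " par] else []
  | l :: rest, par =>
    let flush := if par ≠ [] then [PySem.Str.join " " par] else []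
    if PySem.Str.isIn "\\raw{" l then
      let c := pvCollectRaw rest [l]
      flush ++ [PySem.Str.join "\n" c.1] ++ pvGoB c.2 []
    else if l = "" then flush ++ [""] ++ pvGoB rest []
    else if PySem.Str.endswith l "\\" then
      flush ++ [PySem.Str.rstrip (PySem.Str.slice l none (some (-1)))] ++ pvGoB rest []
    else pvGoB rest (par ++ [PySem.Str.strip l])
termination_by ls _ => ls.length
decreasing_by
  · exact Nat.lt_succ_of_le (pvCollectRaw_rest_le rest [l])
  all_goals simp

def process_multiline_text_alt (text : String) : String :=
  if text = "" then ""
  else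
    let lines := ((PySem.Str.split? text "\n").getD []).map PySem.Str.rstrip
    PySem.Str.join "\n\n" (pvGoB lines [])

-- ===== PRECONDITION & SPEC =====
def Spec_process_multiline_text (text : String) (out : String) : Prop := out = process_multiline_text_alt text
instance (text : String) (out : String) : Decidable (Spec_process_multiline_text text out) := by unfold Spec_process_multiline_text; infer_instance

-- ===== CLAIM (what is proved, stated in full; the proofs are below) =====
def Claim_equal_process_multiline_text : Prop := ∀ (text : String), Dom_process_multiline_text text → Spec_process_multiline_text text (process_multiline_text text)

-- ===== LEMMAS AND PROOFS =====

-- A's post-loop finalisation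
def pvFinalA (st : List String × List String × Bool × List String) : List String :=
  match st with
  | (pl, cp, inRaw, raw) =>
    if inRaw ∧ raw ≠ [] then pl ++ [PySem.Str.join "\n" raw]
    else if cp ≠ [] then pl ++ [PySem.Str.join " " cp]
    else pl

-- joint invariant: A's fold from a normal state computes pl ++ B's scan of the rest, and
-- A's fold from a raw state computes pl ++ the collected raw block ++ B's scan of the remainder
theorem pvMain : ∀ (lines : List String),
    (∀ (pl cp : List String),
      pvFinalA (lines.foldl pvStepA (pl, cp, false, [])) =
        pl ++ pvGoB (lines.map PySem.Str.rstrip) cp)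
    ∧ (∀ (pl raw : List String), raw ≠ [] →
      pvFinalA (lines.foldl pvStepA (pl, [], true, raw)) =
        pl ++ [PySem.Str.join "\n" (pvCollectRaw (lines.map PySem.Str.rstrip) raw).1]
           ++ pvGoB (pvCollectRaw (lines.map PySem.Str.rstrip) raw).2 []) := by
  intro lines
  induction lines with
  | nil =>
    constructor
    · intro pl cp
      by_cases hcp : cp = [] <;> simp [pvFinalA, pvGoB, hcp]
    · intro pl raw hraw
      simp [pvFinalA, pvGoB, pvCollectRaw, hraw]
  | cons line rest ih =>
    constructor
    · intro pl cp
      simp only [List.foldl, List.map, pvStepA, List.nil_append]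
      by_cases h1 : PySem.Str.isIn "\\raw{" (PySem.Str.rstrip line) = true
      · rw [if_pos h1]
        by_cases hcp : cp = []
        · rw [if_neg (by simp [hcp])]
          rw [(ih.2) pl [PySem.Str.rstrip line] (by simp)]
          conv_rhs => rw [pvGoB]
          clear ih
          simp_all [List.append_assoc]
        · rw [if_pos hcp]
          rw [(ih.2) (pl ++ [PySem.Str.join " " cp]) [PySem.Str.rstrip line] (by simp)]
          conv_rhs => rw [pvGoB]
          clear ih
          simp_all [List.append_assoc]
      · rw [if_neg h1, if_neg (by simp)]
        by_cases h2 : PySem.Str.rstrip line = ""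
        · rw [if_pos h2]
          by_cases hcp : cp = []
          · rw [if_neg (by simp [hcp])]
            rw [ih.1]
            conv_rhs => rw [pvGoB]
            clear ih
            simp_all [List.append_assoc]
          · rw [if_pos hcp]
            rw [ih.1]
            conv_rhs => rw [pvGoB]
            clear ih
            simp_all [List.append_assoc]
        · rw [if_neg h2]
          by_cases h3 : PySem.Str.endswith (PySem.Str.rstrip line) "\\" = true
          · rw [if_pos h3]
            by_cases hcp : cp = []
            · rw [if_neg (by simp [hcp])]
              rw [ih.1]
              conv_rhs => rw [pvGoB]
              clear ih
              simp_all [List.append_assoc]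
            · rw [if_pos hcp]
              rw [ih.1]
              conv_rhs => rw [pvGoB]
              clear ih
              simp_all [List.append_assoc]
          · rw [if_neg h3]
            rw [ih.1]
            conv_rhs => rw [pvGoB]
            clear ih
            simp_all
    · intro pl raw hraw
      simp only [List.foldl, List.map, pvStepA, List.nil_append]
      by_cases h1 : PySem.Str.isIn "\\raw{" (PySem.Str.rstrip line) = true
      · rw [if_pos h1, if_neg (by simp)]
        rw [(ih.2) pl (raw ++ [PySem.Str.rstrip line]) (by simp)]
        conv_rhs => rw [pvCollectRaw]
        clear ih
        simp_all [List.append_assoc]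
      · rw [if_neg h1]
        simp only [if_true]
        by_cases h2 : PySem.Str.isIn "}" (PySem.Str.rstrip line) = true
        · rw [if_pos h2]
          rw [ih.1]
          conv_rhs => rw [pvCollectRaw]
          clear ih
          simp_all [List.append_assoc]
        · rw [if_neg h2]
          rw [(ih.2) pl (raw ++ [PySem.Str.rstrip line]) (by simp)]
          conv_rhs => rw [pvCollectRaw]
          clear ih
          simp_all [List.append_assoc]

-- ===== VERDICT (by name: the statement is the Claim_ definition above) =====
theorem process_multiline_text_spec : Claim_equal_process_multiline_text := by
  intro text _
  unfold Spec_process_multiline_text process_multiline_text process_multiline_text_alt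
  split_ifs with h
  · rfl
  · have hmain := (pvMain ((PySem.Str.split? text "\n").getD [])).1 [] []
    simp only [List.nil_append] at hmain
    dsimp only
    rw [← hmain]
    rcases List.foldl pvStepA ([], [], false, []) ((PySem.Str.split? text "\n").getD []) with
      ⟨pl, cp, inRaw, raw⟩
    simp [pvFinalA]
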